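-- pv_equiv track=rewrite | github.com/ywangd/pybufrkit | pybufrkit/script.py | process_embedded_query_expr
-- ===== SOURCE A (Python) =====
-- STATE_IDLE = ''
--
-- STATE_EMBEDDED_QUERY = '${'
--
-- STATE_COMMENT = '#'
--
-- def process_embedded_query_expr(input_string):
--     """
--     This function scans through the given script and identify any path/metadata
--     expressions. For each expression found, an unique python variable name will
--     be generated. The expression is then substituted by the variable name.
--
--     :param str input_string: The input script
--     :return: A 2-element tuple of the substituted string and a dict of substitutions
--     :rtype: (str, dict)
--     """
--     keep = []
--     state = ''
--     idx_char = idx_var = 0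
--     substitutions = {}  # keyed by query expression
--
--     query_expr = []
--     while idx_char < len(input_string):
--         c = input_string[idx_char]
--
--         if state == STATE_EMBEDDED_QUERY:
--             if c == '}':
--                 state = STATE_IDLE
--                 s = ''.join(query_expr).strip()
--                 query_expr = []
--                 if s not in substitutions:
--                     varname = 'PBK_{}'.format(idx_var)
--                     idx_var += 1
--                     substitutions[s] = varname
--                 else:
--                     varname = substitutions[s]
--                 keep.append(varname)
--             else:
--                 query_expr.append(c)
--
--         elif (c == "'" or c == '"') and state != STATE_EMBEDDED_QUERY:
--             if state == c:  # quoting pair found, pop it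
--                 state = STATE_IDLE
--             elif state == '':  # new quote begins
--                 state = c
--             keep.append(c)
--
--         elif c == '$' and state == STATE_IDLE:  # an unquoted $
--             if idx_char + 1 < len(input_string) and input_string[idx_char + 1] == '{':
--                 state = STATE_EMBEDDED_QUERY
--                 # Once it enters the embedded query state, any pond,
--                 # double/single quotes will be ignored
--                 idx_char += 1
--             else:
--                 keep.append(c)
--
--         elif c == '#' and state == STATE_IDLE:
--             state = STATE_COMMENT
--             keep.append(c)
--
--         elif c == '\n' and state == STATE_COMMENT:
--             state = STATE_IDLE
--             keep.append(c)
--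
--         else:
--             keep.append(c)
--
--         idx_char += 1
--
--     return ''.join(keep), substitutions
-- ===== SOURCE B (Python) =====
-- def process_embedded_query_expr(input_string):
--     """Chunk-based scanner: instead of a char-by-char state machine, jump over
--     whole quoted strings / comments / embedded queries using str.find."""
--     out = []
--     subs = {}
--     i = 0
--     n = len(input_string)
--     while i < n:
--         c = input_string[i]
--         if c == '$' and i + 1 < n and input_string[i + 1] == '{':
--             j = input_string.find('}', i + 2)
--             if j == -1:
--                 break  # unterminated query: the rest is swallowed
--             s = input_string[i + 2:j].strip()
--             if s not in subs:
--                 subs[s] = 'PBK_{}'.format(len(subs))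
--             out.append(subs[s])
--             i = j + 1
--         elif c == "'" or c == '"':
--             j = input_string.find(c, i + 1)
--             if j == -1:
--                 out.append(input_string[i:])
--                 i = n
--             else:
--                 out.append(input_string[i:j + 1])
--                 i = j + 1
--         elif c == '#':
--             j = input_string.find('\n', i)
--             if j == -1:
--                 out.append(input_string[i:])
--                 i = n
--             else:
--                 out.append(input_string[i:j + 1])
--                 i = j + 1
--         else:
--             out.append(c)
--             i += 1
--     return ''.join(out), subs
-- ===== Notes on version B (the rewrite author's own statement) =====
-- stated objective: idiomatic
-- what changed: A's character-by-character five-state machine (state variable, per-char branch ladder) is replaced by a chunk scanner that, at the start of an embedded query, quoted string or comment, finds the closing delimiter with str.find and consumes the whole chunk with one slice, numbering new substitutions by len(subs).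
import Mathlib
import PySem

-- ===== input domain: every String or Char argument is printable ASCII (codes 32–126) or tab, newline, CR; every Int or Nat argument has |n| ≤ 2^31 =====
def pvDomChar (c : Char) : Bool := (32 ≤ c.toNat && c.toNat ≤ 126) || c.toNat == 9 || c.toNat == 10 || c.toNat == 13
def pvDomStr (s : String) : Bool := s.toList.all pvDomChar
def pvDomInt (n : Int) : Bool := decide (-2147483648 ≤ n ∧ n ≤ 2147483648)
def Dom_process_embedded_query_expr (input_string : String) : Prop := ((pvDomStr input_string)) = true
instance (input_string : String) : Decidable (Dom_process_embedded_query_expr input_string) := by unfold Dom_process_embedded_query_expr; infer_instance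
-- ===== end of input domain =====

-- B replaces A's char-by-char five-state machine by a chunk scanner that jumps over whole
-- quoted strings / comments / embedded queries with find-and-slice (objective: idiomatic/alternative).

-- ===== PORT A =====
-- the while loop of A as structural recursion over the remaining characters;
-- state is the Python state string ('', '${', '#', "'", '"'), query/keep the accumulators
def pvA_loop : List Char → String → Nat → PySem.Dict String String → List Char → List Char →
    List Char × PySem.Dict String String
  | [], _, _, subs, _, keep => (keep, subs)
  | c :: rest, state, idx_var, subs, query, keep =>
    if state == "${" then
      if c == '}' then
        -- s = ''.join(query_expr).strip()  (PySem.Chars.strip is exact for str.strip)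
        let s := String.ofList (PySem.Chars.strip query)
        match subs.get? s with
        | none =>
          let varname := "PBK_" ++ PySem.Int.toStr (idx_var : Int)
          pvA_loop rest "" (idx_var + 1) (subs.insert s varname) [] (keep ++ varname.toList)
        | some varname => pvA_loop rest "" idx_var subs [] (keep ++ varname.toList)
      else pvA_loop rest state idx_var subs (query ++ [c]) keep
    else if c == '\'' || c == '"' then
      let state' := if state == String.ofList [c] then "" else if state == "" then String.ofList [c] else state
      pvA_loop rest state' idx_var subs query (keep ++ [c])
    else if c == '$' && state == "" then
      match rest with
      | c2 :: rest2 =>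
        if c2 == '{' then pvA_loop rest2 "${" idx_var subs query keep  -- idx_char += 1 (skip '{')
        else pvA_loop (c2 :: rest2) state idx_var subs query (keep ++ [c])
      | [] => pvA_loop ([] : List Char) state idx_var subs query (keep ++ [c])
    else if c == '#' && state == "" then
      pvA_loop rest "#" idx_var subs query (keep ++ [c])
    else if c == '\n' && state == "#" then
      pvA_loop rest "" idx_var subs query (keep ++ [c])
    else
      pvA_loop rest state idx_var subs query (keep ++ [c])
  termination_by cs _ _ _ _ _ => cs.length
  decreasing_by all_goals (subst_vars; simp only [List.length_drop, List.length_cons]; omega)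

def process_embedded_query_expr (input_string : String) : String × (List (String × String)) :=
  let r := pvA_loop input_string.toList "" 0 PySem.Dict.empty [] []
  (String.ofList r.1, r.2.items)

-- ===== PORT B =====
-- Source B's chunk scanner: on '$'+'{' / quote / '#' it finds the closing delimiter
-- (str.find ported as takeWhile on the not-yet-matched prefix) and consumes the chunk at once
def pvB_loop : List Char → PySem.Dict String String → List Char →
    List Char × PySem.Dict String String
  | [], subs, out => (out, subs)
  | c :: rest, subs, out =>
    if c == '$' then
      match rest with
      | c2 :: rest2 =>
        if c2 == '{' then
          let body := rest2.takeWhile (fun x => !(x == '}'))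
          if h : body.length < rest2.length then  -- find('}') succeeded
            let s := String.ofList (PySem.Chars.strip body)
            let subs' := if subs.contains s then subs
                         else subs.insert s ("PBK_" ++ PySem.Int.toStr (subs.size : Int))
            pvB_loop (rest2.drop (body.length + 1)) subs' (out ++ (subs'.getD s "").toList)
          else (out, subs)  -- unterminated query: the rest is swallowed
        else pvB_loop (c2 :: rest2) subs (out ++ [c])
      | [] => pvB_loop ([] : List Char) subs (out ++ [c])
    else if c == '\'' || c == '"' then
      let body := rest.takeWhile (fun x => !(x == c))
      if h : body.length < rest.length then  -- closing quote found
        pvB_loop (rest.drop (body.length + 1)) subs (out ++ c :: body ++ [c])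
      else (out ++ c :: rest, subs)
    else if c == '#' then
      let body := rest.takeWhile (fun x => !(x == '\n'))
      if h : body.length < rest.length then
        pvB_loop (rest.drop (body.length + 1)) subs (out ++ c :: body ++ ['\n'])
      else (out ++ c :: rest, subs)
    else pvB_loop rest subs (out ++ [c])
  termination_by cs => cs.length
  decreasing_by all_goals (subst_vars; simp only [List.length_drop, List.length_cons]; omega)

def process_embedded_query_expr_alt (input_string : String) : String × (List (String × String)) :=
  let r := pvB_loop input_string.toList PySem.Dict.empty []
  (String.ofList r.1, r.2.items)

-- ===== PRECONDITION & SPEC =====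
def Spec_process_embedded_query_expr (input_string : String) (out : String × (List (String × String))) : Prop := out = process_embedded_query_expr_alt input_string
instance (input_string : String) (out : String × (List (String × String))) : Decidable (Spec_process_embedded_query_expr input_string out) := by unfold Spec_process_embedded_query_expr; infer_instance

-- ===== CLAIM (what is proved, stated in full; the proofs are below) =====
def Claim_equal_process_embedded_query_expr : Prop := ∀ (input_string : String), Dom_process_embedded_query_expr input_string → Spec_process_embedded_query_expr input_string (process_embedded_query_expr input_string)

-- ===== LEMMAS AND PROOFS =====

-- in a quote state, A copies characters up to and including the matching quote, then returns to ''
lemma pvA_quote (q : Char) (hq : q = '\'' ∨ q = '"') :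
    ∀ (cs : List Char) (idx : Nat) (subs : PySem.Dict String String) (query keep : List Char),
    pvA_loop cs (String.ofList [q]) idx subs query keep =
      (let body := cs.takeWhile (fun x => !(x == q))
       if body.length < cs.length then
         pvA_loop (cs.drop (body.length + 1)) "" idx subs query (keep ++ body ++ [q])
       else (keep ++ cs, subs)) := by
  have e1 : (String.ofList [q] == "${") = false := by rcases hq with rfl | rfl <;> rfl
  have e2 : (String.ofList [q] == "") = false := by rcases hq with rfl | rfl <;> rfl
  have e3 : (String.ofList [q] == "#") = false := by rcases hq with rfl | rfl <;> rfl
  have e4 : (q == '\'' || q == '"') = true := by rcases hq with rfl | rfl <;> rfl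
  intro cs
  induction cs with
  | nil => intro idx subs query keep; simp [pvA_loop]
  | cons c rest ih =>
    intro idx subs query keep
    by_cases hc : c = q
    · subst hc
      rw [pvA_loop.eq_def]
      simp [e1, e4, List.takeWhile_cons]
    · have e5 : (String.ofList [q] == String.ofList [c]) = false := by
        simp [beq_eq_false_iff_ne, String.ofList_inj]
        exact fun h => hc h.symm
      have step : pvA_loop (c :: rest) (String.ofList [q]) idx subs query keep
          = pvA_loop rest (String.ofList [q]) idx subs query (keep ++ [c]) := by
        rw [pvA_loop.eq_def]
        by_cases h1 : c = '\''
        · subst h1; simp [e1, e5, e2]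
        · by_cases h2 : c = '"'
          · subst h2; simp [e1, e5, e2]
          · by_cases h3 : c = '$'
            · subst h3; simp [e1, e2, h1, h2]
            · by_cases h4 : c = '#'
              · subst h4; simp [e1, e2, h1, h2, h3]
              · by_cases h5 : c = '\n'
                · subst h5; simp [e1, e2, e3, h1, h2, h3, h4]
                · simp [e1, e2, e3, h1, h2, h3, h4, h5]
      rw [step, ih]
      simp [List.takeWhile_cons, hc]

-- in the comment state, A copies characters up to and including '\n', then returns to ''
lemma pvA_comment :
    ∀ (cs : List Char) (idx : Nat) (subs : PySem.Dict String String) (query keep : List Char),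
    pvA_loop cs "#" idx subs query keep =
      (let body := cs.takeWhile (fun x => !(x == '\n'))
       if body.length < cs.length then
         pvA_loop (cs.drop (body.length + 1)) "" idx subs query (keep ++ body ++ ['\n'])
       else (keep ++ cs, subs)) := by
  intro cs
  induction cs with
  | nil => intro idx subs query keep; simp [pvA_loop]
  | cons c rest ih =>
    intro idx subs query keep
    by_cases hc : c = '\n'
    · subst hc
      rw [pvA_loop.eq_def]
      simp [List.takeWhile_cons]
    · have step : pvA_loop (c :: rest) "#" idx subs query keep
          = pvA_loop rest "#" idx subs query (keep ++ [c]) := by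
        rw [pvA_loop.eq_def]
        by_cases h1 : c = '\''
        · subst h1; simp [show String.ofList ['\''] = "'" from rfl]
        · by_cases h2 : c = '"'
          · subst h2; simp [show String.ofList ['"'] = "\"" from rfl]
          · by_cases h3 : c = '$'
            · subst h3; simp [h1, h2]
            · by_cases h4 : c = '#'
              · subst h4; simp [h1, h2, h3]
              · simp [h1, h2, h3, h4, hc]
      rw [step, ih]
      simp [List.takeWhile_cons, hc]

-- in the embedded-query state, A accumulates into query up to '}', then substitutes
lemma pvA_query :
    ∀ (cs : List Char) (idx : Nat) (subs : PySem.Dict String String) (query keep : List Char),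
    pvA_loop cs "${" idx subs query keep =
      (let body := cs.takeWhile (fun x => !(x == '}'))
       if body.length < cs.length then
         let s := String.ofList (PySem.Chars.strip (query ++ body))
         match subs.get? s with
         | none =>
           let varname := "PBK_" ++ PySem.Int.toStr (idx : Int)
           pvA_loop (cs.drop (body.length + 1)) "" (idx + 1) (subs.insert s varname) [] (keep ++ varname.toList)
         | some varname => pvA_loop (cs.drop (body.length + 1)) "" idx subs [] (keep ++ varname.toList)
       else (keep, subs)) := by
  intro cs
  induction cs with
  | nil => intro idx subs query keep; simp [pvA_loop]
  | cons c rest ih =>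
    intro idx subs query keep
    by_cases hc : c = '}'
    · subst hc
      rw [pvA_loop.eq_def]
      simp [List.takeWhile_cons]
    · rw [show pvA_loop (c :: rest) "${" idx subs query keep
            = pvA_loop rest "${" idx subs (query ++ [c]) keep by rw [pvA_loop.eq_def]; simp [hc], ih]
      simp [List.takeWhile_cons, hc]

-- the main simulation: from the idle state with an empty query, A's machine is B's chunk scanner,
-- provided A's variable counter equals the number of substitutions recorded so far
lemma pvAB_main_aux :
    ∀ (n : Nat) (cs : List Char), cs.length ≤ n →
    ∀ (subs : PySem.Dict String String) (keep : List Char),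
    pvA_loop cs "" subs.size subs [] keep = pvB_loop cs subs keep := by
  intro n
  induction n with
  | zero =>
    intro cs h subs keep
    have : cs = [] := List.eq_nil_of_length_eq_zero (Nat.le_zero.mp h)
    subst this
    simp [pvA_loop, pvB_loop]
  | succ n ih =>
    intro cs hlen subs keep
    match cs, hlen with
    | [], _ => simp [pvA_loop, pvB_loop]
    | c :: rest, hlen =>
      have hr : rest.length ≤ n := by simp at hlen; omega
      by_cases hq : c = '\'' ∨ c = '"'
      · -- quoted string chunk
        have stepA : pvA_loop (c :: rest) "" subs.size subs [] keep
            = pvA_loop rest (String.ofList [c]) subs.size subs [] (keep ++ [c]) := by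
          rw [pvA_loop.eq_def]; rcases hq with rfl | rfl <;> simp
        have stepB : pvB_loop (c :: rest) subs keep
            = (let body := rest.takeWhile (fun x => !(x == c))
               if _ : body.length < rest.length then
                 pvB_loop (rest.drop (body.length + 1)) subs (keep ++ c :: body ++ [c])
               else (keep ++ c :: rest, subs)) := by
          rw [pvB_loop.eq_def]; rcases hq with rfl | rfl <;> simp
        rw [stepA, pvA_quote c hq, stepB]
        by_cases hlt : (rest.takeWhile (fun x => !(x == c))).length < rest.length
        · simp only [hlt, if_true, dite_true]
          rw [ih _ (by simp [List.length_drop]; omega)]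
          simp
        · simp [hlt]
      · by_cases hd : c = '$'
        · subst hd
          match rest, hr with
          | [], _ =>
            rw [pvA_loop.eq_def, pvB_loop.eq_def]; simp [pvA_loop, pvB_loop]
          | c2 :: rest2, hr =>
            have hr2 : rest2.length ≤ n := by simp at hr; omega
            by_cases h2 : c2 = '{'
            · subst h2
              have stepA : pvA_loop ('$' :: '{' :: rest2) "" subs.size subs [] keep
                  = pvA_loop rest2 "${" subs.size subs [] keep := by
                rw [pvA_loop.eq_def]; simp
              rw [stepA, pvA_query, pvB_loop.eq_def]
              simp only [List.nil_append]
              by_cases hlt : (rest2.takeWhile (fun x => !(x == '}'))).length < rest2.length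
              · set tw := rest2.takeWhile (fun x => !(x == '}')) with htw
                set sk := String.ofList (PySem.Chars.strip tw) with hsk
                cases hget : subs.get? sk with
                | none =>
                  have hcont : subs.contains sk = false := by
                    rw [PySem.Dict.contains_eq_isSome_get?, hget]; rfl
                  have hsz : subs.size + 1 = (subs.insert sk ("PBK_" ++ PySem.Int.toStr (subs.size : Int))).size := by
                    rw [PySem.Dict.size_insert]; simp [hcont]
                  simp only [hlt, if_true, dite_true, hcont, Bool.false_eq_true, if_false, hget]
                  rw [hsz, ih _ (by simp [List.length_drop]; omega)]
                  simp [PySem.Dict.getD_insert_self]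
                | some v =>
                  have hcont : subs.contains sk = true := by
                    rw [PySem.Dict.contains_eq_isSome_get?, hget]; rfl
                  have hgd : subs.getD sk "" = v := by
                    rw [PySem.Dict.getD_eq_get?_getD, hget]; rfl
                  simp only [hlt, if_true, dite_true, hcont, hget]
                  rw [ih _ (by simp [List.length_drop]; omega)]
                  simp [hgd]
              · simp [hlt]
            · have stepA : pvA_loop ('$' :: c2 :: rest2) "" subs.size subs [] keep
                  = pvA_loop (c2 :: rest2) "" subs.size subs [] (keep ++ ['$']) := by
                rw [pvA_loop.eq_def]; simp [h2]
              have stepB : pvB_loop ('$' :: c2 :: rest2) subs keep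
                  = pvB_loop (c2 :: rest2) subs (keep ++ ['$']) := by
                rw [pvB_loop.eq_def]; simp [h2]
              rw [stepA, stepB, ih _ hr]
        · by_cases hh : c = '#'
          · subst hh
            have stepA : pvA_loop ('#' :: rest) "" subs.size subs [] keep
                = pvA_loop rest "#" subs.size subs [] (keep ++ ['#']) := by
              rw [pvA_loop.eq_def]; simp
            have stepB : pvB_loop ('#' :: rest) subs keep
                = (let body := rest.takeWhile (fun x => !(x == '\n'))
                   if _ : body.length < rest.length then
                     pvB_loop (rest.drop (body.length + 1)) subs (keep ++ '#' :: body ++ ['\n'])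
                   else (keep ++ '#' :: rest, subs)) := by
              rw [pvB_loop.eq_def]; simp
            rw [stepA, pvA_comment, stepB]
            by_cases hlt : (rest.takeWhile (fun x => !(x == '\n'))).length < rest.length
            · simp only [hlt, if_true, dite_true]
              rw [ih _ (by simp [List.length_drop]; omega)]
              simp
            · simp [hlt]
          · -- plain character
            rw [not_or] at hq
            obtain ⟨hq1, hq2⟩ := hq
            have stepA : pvA_loop (c :: rest) "" subs.size subs [] keep
                = pvA_loop rest "" subs.size subs [] (keep ++ [c]) := by
              rw [pvA_loop.eq_def]; simp [hq1, hq2, hd, hh]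
            have stepB : pvB_loop (c :: rest) subs keep
                = pvB_loop rest subs (keep ++ [c]) := by
              rw [pvB_loop.eq_def]; simp [hq1, hq2, hd, hh]
            rw [stepA, stepB, ih _ hr]

lemma pvAB_main :
    ∀ (cs : List Char) (subs : PySem.Dict String String) (keep : List Char),
    pvA_loop cs "" subs.size subs [] keep = pvB_loop cs subs keep :=
  fun cs subs keep => pvAB_main_aux cs.length cs le_rfl subs keep

-- ===== VERDICT (by name: the statement is the Claim_ definition above) =====
theorem process_embedded_query_expr_spec : Claim_equal_process_embedded_query_expr := by
  intro s _
  unfold Spec_process_embedded_query_expr process_embedded_query_expr process_embedded_query_expr_alt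
  rw [show (0 : Nat) = (PySem.Dict.empty : PySem.Dict String String).size from rfl, pvAB_main]
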